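-- pv_equiv track=rewrite | github.com/Bots/pyjippety | src/pyjippety/memory.py | extract_memory_command
-- ===== SOURCE A (Python) =====
-- def extract_memory_command(prompt: str) -> str | None:
--     lowered = prompt.strip().lower()
--     prefixes = (
--         "remember that ",
--         "remember ",
--         "please remember that ",
--         "please remember ",
--     )
--     for prefix in prefixes:
--         if lowered.startswith(prefix):
--             return prompt.strip()[len(prefix) :].strip()
--     return None
-- ===== SOURCE B (Python) =====
-- def extract_memory_command(prompt: str) -> str | None:
--     # Anchored single-pass matcher: optional "please ", required "remember ",
--     # optional greedy "that "; slice the original-case stripped prompt once.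
--     stripped = prompt.strip()
--     lowered = stripped.lower()
--     pos = 7 if lowered.startswith("please ") else 0
--     if not lowered[pos:].startswith("remember "):
--         return None
--     pos += 9
--     if lowered[pos:].startswith("that "):
--         pos += 5
--     return stripped[pos:].strip()
-- ===== Notes on version B (the rewrite author's own statement) =====
-- stated objective: idiomatic
-- what changed: Replaces A's loop over four literal prefixes by a single anchored matcher (optional 'please ', required 'remember ', optional greedy 'that ') that computes one match length and slices the stripped prompt once.
import Mathlib
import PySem

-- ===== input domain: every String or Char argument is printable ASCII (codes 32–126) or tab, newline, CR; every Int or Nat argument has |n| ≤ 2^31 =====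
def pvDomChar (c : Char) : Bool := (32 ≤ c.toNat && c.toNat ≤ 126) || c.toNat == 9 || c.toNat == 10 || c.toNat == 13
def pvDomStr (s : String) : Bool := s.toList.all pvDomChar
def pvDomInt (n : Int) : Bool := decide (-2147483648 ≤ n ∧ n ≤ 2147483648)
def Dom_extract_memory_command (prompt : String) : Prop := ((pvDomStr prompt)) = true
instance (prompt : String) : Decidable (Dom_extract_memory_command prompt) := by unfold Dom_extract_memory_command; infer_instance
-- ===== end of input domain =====

-- B replaces A's loop over four prefixes by one anchored matcher (optional "please ",
-- required "remember ", optional greedy "that ") and slices the stripped prompt once; objective: idiomatic.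

-- ===== PORT A =====
def extract_memory_command (prompt : String) : Option String :=
  let lowered := PySem.Str.lower (PySem.Str.strip prompt)
  let prefixes : List String :=
    ["remember that ", "remember ", "please remember that ", "please remember "]
  match prefixes.find? (fun prefix_ => PySem.Str.startswith lowered prefix_) with
  | some prefix_ =>
      some (PySem.Str.strip
        (PySem.Str.slice (PySem.Str.strip prompt) (some (PySem.Str.len prefix_)) none))
  | none => none

-- ===== PORT B =====
def extract_memory_command_alt (prompt : String) : Option String :=
  let stripped := PySem.Str.strip prompt
  let lowered := PySem.Str.lower stripped
  let pos : Int := if PySem.Str.startswith lowered "please " then 7 else 0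
  if !(PySem.Str.startswith (PySem.Str.slice lowered (some pos) none) "remember ") then
    none
  else
    let pos := pos + 9
    let pos := if PySem.Str.startswith (PySem.Str.slice lowered (some pos) none) "that "
               then pos + 5 else pos
    some (PySem.Str.strip (PySem.Str.slice stripped (some pos) none))

-- ===== PRECONDITION & SPEC =====
def Spec_extract_memory_command (prompt : String) (out : Option String) : Prop := out = extract_memory_command_alt prompt
instance (prompt : String) (out : Option String) : Decidable (Spec_extract_memory_command prompt out) := by unfold Spec_extract_memory_command; infer_instance

-- ===== CLAIM (what is proved, stated in full; the proofs are below) =====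
def Claim_equal_extract_memory_command : Prop := ∀ (prompt : String), Dom_extract_memory_command prompt → Spec_extract_memory_command prompt (extract_memory_command prompt)

-- ===== LEMMAS AND PROOFS =====

theorem pv_prefix_append (a : List Char) : ∀ (s b : List Char),
    (a ++ b) <+: s ↔ a <+: s ∧ b <+: s.drop a.length := by
  induction a with
  | nil => simp
  | cons c a ih =>
    intro s b
    cases s with
    | nil => simp
    | cons d t => simp [List.cons_prefix_cons, ih, and_assoc]

theorem pv_sw_append (s a b : List Char) :
    PySem.Chars.startswith s (a ++ b)
      = (PySem.Chars.startswith s a && PySem.Chars.startswith (s.drop a.length) b) := by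
  rw [Bool.eq_iff_iff]
  simp only [Bool.and_eq_true, PySem.Chars.startswith_iff]
  exact pv_prefix_append a s b

theorem pv_please_not_remember (l : List Char)
    (h : PySem.Chars.startswith l "please ".toList = true) :
    PySem.Chars.startswith l "remember ".toList = false := by
  cases l with
  | nil => simp [PySem.Chars.startswith] at h
  | cons c t =>
    simp only [PySem.Chars.startswith_iff] at h
    obtain ⟨hc, -⟩ := by simpa using h
    simp [PySem.Chars.startswith, List.isPrefixOf, ← hc]

theorem extract_memory_command_eq (prompt : String) :
    extract_memory_command prompt = extract_memory_command_alt prompt := by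
  unfold extract_memory_command extract_memory_command_alt
  simp only [List.find?, PySem.Str.startswith_eq, PySem.Str.toList_lower, PySem.Str.toList_slice,
    PySem.Chars.slice_eq_listSlice]
  generalize (PySem.Str.strip prompt) = s
  generalize hl : PySem.Chars.lower s.toList = l
  have e1 : ("remember that ".toList : List Char) = "remember ".toList ++ "that ".toList := by decide
  have e2 : ("please remember that ".toList : List Char) = "please ".toList ++ ("remember ".toList ++ "that ".toList) := by decide
  have e3 : ("please remember ".toList : List Char) = "please ".toList ++ "remember ".toList := by decide
  have L7 : ("please ".toList : List Char).length = 7 := by decide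
  have L9 : ("remember ".toList : List Char).length = 9 := by decide
  have len1 : PySem.Str.len "remember that " = 14 := by decide
  have len2 : PySem.Str.len "remember " = 9 := by decide
  have len3 : PySem.Str.len "please remember that " = 21 := by decide
  have len4 : PySem.Str.len "please remember " = 16 := by decide
  have n1 : "remember that ".length = 14 := by decide
  have n2 : "remember ".length = 9 := by decide
  have n3 : "please remember that ".length = 21 := by decide
  have n4 : "please remember ".length = 16 := by decide
  have s0 : PySem.List.slice l (some (0:Int)) none = l := by simp [pysem]
  have s7 : PySem.List.slice l (some (7:Int)) none = l.drop 7 := by simp [pysem]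
  have s9 : PySem.List.slice l (some (9:Int)) none = l.drop 9 := by simp [pysem]
  have s16 : PySem.List.slice l (some ((7:Int)+9)) none = l.drop 16 := by norm_num; simp [pysem]
  rw [e1, e2, e3]
  simp only [pv_sw_append, L7, L9, List.drop_drop]
  by_cases hP : PySem.Chars.startswith l "please ".toList = true
  · have hR := pv_please_not_remember l hP
    simp only [hP, hR, if_true, Bool.false_and, Bool.true_and, s7, s16]
    by_cases hR7 : PySem.Chars.startswith (l.drop 7) "remember ".toList = true
    · have h16 : (9:Nat) + 7 = 16 := by norm_num
      rw [h16]
      by_cases hT : PySem.Chars.startswith (l.drop 16) "that ".toList = true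
      · simp only [hR7, hT, Bool.true_and, Bool.not_true, len3]
        norm_num
      · simp only [hR7, hT, Bool.and_false, Bool.not_true, len4]
        norm_num
    · simp only [hR7, Bool.false_and, Bool.not_false, if_true]
  · replace hP : PySem.Chars.startswith l "please ".toList = false := by
      simpa using hP
    simp only [hP, Bool.false_and]
    by_cases hR : PySem.Chars.startswith l "remember ".toList = true
    · by_cases hT : PySem.Chars.startswith (l.drop 9) "that ".toList = true
      · norm_num [hR, hT, s9, len1, n1]
      · replace hT : PySem.Chars.startswith (l.drop 9) "that ".toList = false := by simpa using hT
        norm_num [hR, hT, s9, len2, n2]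
    · replace hR : PySem.Chars.startswith l "remember ".toList = false := by simpa using hR
      simp at hR
      simp [hR, s0]

-- ===== VERDICT (by name: the statement is the Claim_ definition above) =====
theorem extract_memory_command_spec : Claim_equal_extract_memory_command := by
  intro prompt _
  unfold Spec_extract_memory_command
  exact extract_memory_command_eq prompt
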